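-- pv_equiv track=rewrite | github.com/kevingrip/figus | mundial/sacarEspacioMundial.py | espacioFigu
-- ===== SOURCE A (Python) =====
-- def espacioFigu(figus):
--     cantCaracter = 0
--     figusNuevo=''
--     for caracter in figus:
--         cantCaracter +=1
--         if caracter == ',':
--             cantCaracter = 0
--             figusNuevo += ', '
--         else:
--             if cantCaracter == 4:
--                 figusNuevo +=  " "+caracter
--             else:
--                 figusNuevo += caracter
--     return (figusNuevo)
-- ===== SOURCE B (Python) =====
-- def espacioFigu(figus):
--     partes = figus.split(',')
--     nuevas = []
--     for seg in partes:
--         if len(seg) > 3: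
--             nuevas.append(seg[:3] + ' ' + seg[3:])
--         else:
--             nuevas.append(seg)
--     return ', '.join(nuevas)
-- ===== Notes on version B (the rewrite author's own statement) =====
-- stated objective: faster
-- what changed: Replaces the per-character counting loop that grows a string by repeated concatenation with a split-on-comma pass that slices one space into each segment longer than 3 characters and joins the segments back.
import Mathlib
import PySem

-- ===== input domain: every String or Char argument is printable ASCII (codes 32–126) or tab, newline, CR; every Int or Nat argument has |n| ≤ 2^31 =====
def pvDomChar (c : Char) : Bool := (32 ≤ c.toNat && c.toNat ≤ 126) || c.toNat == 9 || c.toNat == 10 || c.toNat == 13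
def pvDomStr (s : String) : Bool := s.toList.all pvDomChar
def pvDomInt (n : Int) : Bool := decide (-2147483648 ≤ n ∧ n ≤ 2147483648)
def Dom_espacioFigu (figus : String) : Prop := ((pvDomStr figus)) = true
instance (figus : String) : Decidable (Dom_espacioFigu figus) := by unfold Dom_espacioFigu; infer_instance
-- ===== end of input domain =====

-- B replaces A's character-counting concatenation loop by split-on-comma / per-segment slice / join (measured faster by a constant factor).

-- ===== PORT A =====
-- loop state = (cantCaracter, figusNuevo as a char list); String.mk at the end
def espacioFigu (figus : String) : String :=
  let st := figus.toList.foldl (fun (st : Int × List Char) caracter =>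
    let cant := st.1 + 1
    if caracter = ',' then (0, st.2 ++ [',', ' '])
    else if cant = 4 then (cant, st.2 ++ [' ', caracter])
    else (cant, st.2 ++ [caracter])) (0, [])
  String.ofList st.2

-- ===== PORT B =====
def espacioFigu_alt (figus : String) : String :=
  let partes := (PySem.Chars.splitOn figus.toList [',']).map String.ofList
  let nuevas := partes.map (fun seg =>
    if 3 < PySem.Str.len seg then
      PySem.Str.slice seg none (some 3) ++ " " ++ PySem.Str.slice seg (some 3) none
    else seg)
  PySem.Str.join ", " nuevas

-- ===== PRECONDITION & SPEC =====
def Spec_espacioFigu (figus : String) (out : String) : Prop := out = espacioFigu_alt figus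
instance (figus : String) (out : String) : Decidable (Spec_espacioFigu figus out) := by unfold Spec_espacioFigu; infer_instance

-- ===== CLAIM (what is proved, stated in full; the proofs are below) =====
def Claim_equal_espacioFigu : Prop := ∀ (figus : String), Dom_espacioFigu figus → Spec_espacioFigu figus (espacioFigu figus)

-- ===== LEMMAS AND PROOFS =====

-- A's split into comma-separated segments, as a structural recursion
def mySplit : List Char → List (List Char)
  | [] => [[]]
  | c :: rest =>
    if c = ',' then [] :: mySplit rest
    else
      match mySplit rest with
      | [] => [[c]]
      | h :: t => (c :: h) :: t

theorem mySplit_ne_nil (l : List Char) : mySplit l ≠ [] := by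
  cases l with
  | nil => simp [mySplit]
  | cons c rest =>
    simp only [mySplit]
    split
    · simp
    · split <;> simp

theorem go_eq (l : List Char) : ∀ (fuel : Nat) (cur : List Char) (acc : List (List Char)), l.length < fuel →
    PySem.Chars.splitOn.go [','] fuel l cur acc =
      acc.reverse ++ (match mySplit l with
        | [] => []
        | h :: t => (cur.reverse ++ h) :: t) := by
  induction l with
  | nil =>
    intro fuel cur acc h
    match fuel with
    | f + 1 => simp [PySem.Chars.splitOn.go, mySplit]
  | cons c rest ih =>
    intro fuel cur acc h
    match fuel with
    | f + 1 =>
      by_cases hc : c = ','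
      · subst hc
        have : [','].isPrefixOf (',' :: rest) = true := by simp [List.isPrefixOf]
        rw [PySem.Chars.splitOn.go, if_pos this]
        simp only [List.length_cons, List.length_nil, Nat.zero_add, List.drop_succ_cons,
          List.drop_zero] at h ⊢
        rw [ih f [] (cur.reverse :: acc) (by omega)]
        rcases hne : mySplit rest with _ | ⟨h1, t1⟩
        · exact absurd hne (mySplit_ne_nil rest)
        · simp [mySplit, hne]
      · have hp : [','].isPrefixOf (c :: rest) = false := by
          simp [List.isPrefixOf]; exact fun hh => absurd hh.symm hc
        rw [PySem.Chars.splitOn.go, if_neg (by simp [hp])]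
        simp only [List.length_cons] at h
        rw [ih f (c :: cur) acc (by omega)]
        rcases hne : mySplit rest with _ | ⟨h1, t1⟩
        · exact absurd hne (mySplit_ne_nil rest)
        · simp [mySplit, hne, hc]

theorem splitOn_comma (l : List Char) : PySem.Chars.splitOn l [','] = mySplit l := by
  rw [PySem.Chars.splitOn, go_eq l (l.length + 1) [] [] (by omega)]
  rcases hne : mySplit l with _ | ⟨h1, t1⟩
  · exact absurd hne (mySplit_ne_nil l)
  · simp

-- A's loop as a direct recursion producing the emitted characters
def gA : Int → List Char → List Char
  | _, [] => []
  | cnt, c :: rest =>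
    if c = ',' then ',' :: ' ' :: gA 0 rest
    else (if cnt + 1 = 4 then [' ', c] else [c]) ++ gA (cnt + 1) rest

theorem foldl_gA (l : List Char) : ∀ (cnt : Int) (acc : List Char),
    (l.foldl (fun (st : Int × List Char) caracter =>
      let cant := st.1 + 1
      if caracter = ',' then (0, st.2 ++ [',', ' '])
      else if cant = 4 then (cant, st.2 ++ [' ', caracter])
      else (cant, st.2 ++ [caracter])) (cnt, acc)).2 = acc ++ gA cnt l := by
  induction l with
  | nil => intro cnt acc; simp [gA]
  | cons c rest ih =>
    intro cnt acc
    by_cases h1 : c = ','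
    · simp [gA, h1, ih]
    · by_cases h2 : cnt + 1 = 4
      · simp [gA, h1, h2, ih]
      · simp [gA, h1, h2, ih]

-- what A emits for one segment whose first cnt characters were counted before it
def emit (cnt : Int) (seg : List Char) : List Char :=
  if 3 < cnt then seg
  else if (3 - cnt).toNat < seg.length then
    seg.take (3 - cnt).toNat ++ ' ' :: seg.drop (3 - cnt).toNat
  else seg

theorem emit_cons (cnt : Int) (hc : 0 ≤ cnt) (c : Char) (h : List Char) :
    emit cnt (c :: h) = (if cnt + 1 = 4 then [' ', c] else [c]) ++ emit (cnt + 1) h := by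
  unfold emit
  by_cases h4 : cnt + 1 = 4
  · have h3 : cnt = 3 := by omega
    subst h3
    rw [if_pos h4, if_neg (by omega : ¬ (3:Int) < 3),
      if_pos (show ((3:Int) - 3).toNat < (c :: h).length by simp),
      if_pos (by omega : (3:Int) < 3 + 1)]
    simp
  · rw [if_neg h4]
    by_cases h3 : 3 < cnt
    · rw [if_pos h3, if_pos (by omega : (3:Int) < cnt + 1)]
      simp
    · rw [if_neg h3, if_neg (show ¬ (3:Int) < cnt + 1 by omega)]
      have hk : (3 - cnt).toNat = (3 - (cnt + 1)).toNat + 1 := by omega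
      rw [hk]
      by_cases hl : (3 - (cnt + 1)).toNat < h.length
      · rw [if_pos hl, if_pos (by simp; omega)]
        simp
      · rw [if_neg hl, if_neg (by simp; omega)]
        simp

theorem gA_join (l : List Char) : ∀ (cnt : Int), 0 ≤ cnt →
    gA cnt l = PySem.Chars.join [',', ' ']
      (match mySplit l with
        | [] => []
        | h :: t => emit cnt h :: t.map (emit 0)) := by
  induction l with
  | nil =>
    intro cnt _
    simp [gA, mySplit, PySem.Chars.join, emit, List.intercalate]
  | cons c rest ih =>
    intro cnt hc
    have hemitnil : ∀ k : Int, emit k [] = [] := by intro k; simp [emit]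
    by_cases hcm : c = ','
    · subst hcm
      simp only [gA, mySplit, if_true]
      rw [ih 0 (by omega)]
      rcases hne : mySplit rest with _ | ⟨h1, t1⟩
      · exact absurd hne (mySplit_ne_nil rest)
      · simp only [List.map_cons]
        rw [PySem.Chars.join_cons_cons, hemitnil]
        simp
    · simp only [gA, if_neg hcm, mySplit]
      rw [ih (cnt + 1) (by omega)]
      rcases hne : mySplit rest with _ | ⟨h1, t1⟩
      · exact absurd hne (mySplit_ne_nil rest)
      · simp only []
        rw [emit_cons cnt hc]
        rcases t1 with _ | ⟨q, t2⟩
        · simp [PySem.Chars.join_singleton]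
        · rw [List.map_cons, PySem.Chars.join_cons_cons, PySem.Chars.join_cons_cons]
          simp

theorem emit_zero (seg : List Char) :
    emit 0 seg = if 3 < seg.length then seg.take 3 ++ ' ' :: seg.drop 3 else seg := by
  have h3 : (3 : Int).toNat = 3 := rfl
  unfold emit
  norm_num [h3]

-- what B does to one segment, at the level of char lists
theorem key_seg (seg : List Char) :
    (if 3 < PySem.Str.len (String.ofList seg) then
        PySem.Str.slice (String.ofList seg) none (some 3) ++ " "
          ++ PySem.Str.slice (String.ofList seg) (some 3) none
      else String.ofList seg).toList = emit 0 seg := by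
  rw [emit_zero]
  by_cases hl : 3 < seg.length
  · rw [if_pos (by simp [PySem.Str.len_eq]; exact_mod_cast hl), if_pos hl]
    simp [String.toList_append, PySem.Str.toList_slice,
      PySem.Chars.slice_eq_listSlice, PySem.List.slice_to (b := 3) seg (by omega),
      PySem.List.slice_from (a := 3) seg (by omega)]
  · rw [if_neg (by simp [PySem.Str.len_eq]; omega), if_neg hl]
    simp

-- B's segment map composed back to char lists
theorem map3 (xs : List (List Char)) :
    ((xs.map String.ofList).map (fun seg =>
      if 3 < PySem.Str.len seg then
        PySem.Str.slice seg none (some 3) ++ " " ++ PySem.Str.slice seg (some 3) none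
      else seg)).map String.toList = xs.map (emit 0) := by
  induction xs with
  | nil => simp
  | cons a t ih =>
    simp only [List.map_cons, ih]
    rw [key_seg a]

-- ===== VERDICT (by name: the statement is the Claim_ definition above) =====
theorem espacioFigu_spec : Claim_equal_espacioFigu := by
  intro figus _
  unfold Spec_espacioFigu espacioFigu espacioFigu_alt
  simp only
  rw [foldl_gA figus.toList 0 [], gA_join figus.toList 0 (by omega), splitOn_comma]
  rcases hne : mySplit figus.toList with _ | ⟨h1, t1⟩
  · exact absurd hne (mySplit_ne_nil figus.toList)
  · simp only [List.nil_append, PySem.Str.join, map3, List.map_cons]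
    rw [key_seg h1]
    rfl
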